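-- pv_equiv track=rewrite | github.com/galen-f/voteVisualizer | build_map.py | determine_state_vote
-- ===== SOURCE A (Python) =====
-- from collections import defaultdict
--
-- def determine_state_vote(votes):
--     """
--     Determine the overall state vote based on individual senator votes
--
--     Args:
--         votes (list): List of votes from the state's senators
--
--     Returns:
--         str: Overall state vote ('Yea', 'Nay', 'Split', etc.)
--     """
--     if not votes:
--         return 'Not Voting'
--
--     # Count different vote types
--     vote_counts = defaultdict(int)
--     for vote in votes:
--         vote_counts[vote] += 1
--
--     # Determine state result
--     yea_count = vote_counts.get('Yea', 0)
--     nay_count = vote_counts.get('Nay', 0)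
--
--     if yea_count > 0 and nay_count > 0:
--         return 'Split'
--     elif yea_count > nay_count:
--         return 'Yea'
--     elif nay_count > yea_count:
--         return 'Nay'
--     else:
--         # Handle cases where neither Yea nor Nay (e.g., all abstentions)
--         most_common_vote = max(vote_counts, key=vote_counts.get)
--         return most_common_vote if most_common_vote in ['Yea', 'Nay'] else 'Not Voting'
-- ===== SOURCE B (Python) =====
-- def _classify(v):
--     # A single senator's vote as a state-level outcome.
--     return v if v in ('Yea', 'Nay') else 'Not Voting'
--
-- def _join(a, b):
--     # Combine two partial state outcomes ('Not Voting' is the identity,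
--     # agreeing outcomes stay, disagreeing outcomes give 'Split').
--     if a == 'Not Voting':
--         return b
--     if b == 'Not Voting':
--         return a
--     if a == b:
--         return a
--     return 'Split'
--
-- def determine_state_vote(votes):
--     result = 'Not Voting'
--     for v in votes:
--         result = _join(result, _classify(v))
--         if result == 'Split':
--             break
--     return result
-- ===== Notes on version B (the rewrite author's own statement) =====
-- stated objective: alternative
-- what changed: Replaced the counting dictionary, count comparisons and max-by-count fallback with a fold over a tiny join-semilattice ('Not Voting' identity, equal outcomes stay, 'Yea' joined with 'Nay' gives 'Split') applied to each vote's individual classification, with an early break once 'Split' is reached.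
import Mathlib
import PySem

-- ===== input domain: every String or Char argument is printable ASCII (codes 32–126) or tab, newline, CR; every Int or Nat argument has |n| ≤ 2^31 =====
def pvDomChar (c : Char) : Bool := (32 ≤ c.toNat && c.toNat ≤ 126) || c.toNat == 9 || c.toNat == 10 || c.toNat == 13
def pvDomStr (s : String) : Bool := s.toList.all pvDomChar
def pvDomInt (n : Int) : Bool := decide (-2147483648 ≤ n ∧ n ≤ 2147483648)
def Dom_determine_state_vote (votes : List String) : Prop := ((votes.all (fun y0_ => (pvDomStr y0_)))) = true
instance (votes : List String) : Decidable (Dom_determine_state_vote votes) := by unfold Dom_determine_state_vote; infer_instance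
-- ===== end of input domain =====

-- B replaces A's counting dictionary and max-by-count fallback with a fold over a small
-- join-semilattice of outcomes with an early break on 'Split'; equivalence proved on all inputs.
-- ===== PORT A =====
def determine_state_vote (votes : List String) : String :=
  if votes = [] then "Not Voting"
  else
    let vote_counts := votes.foldl (fun d v => d.modify v 0 (· + 1)) (PySem.Dict.empty : PySem.Dict String Int)
    let yea_count := vote_counts.getD "Yea" 0
    let nay_count := vote_counts.getD "Nay" 0
    if yea_count > 0 ∧ nay_count > 0 then "Split"
    else if yea_count > nay_count then "Yea"
    else if nay_count > yea_count then "Nay"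
    else
      match PySem.List.max? vote_counts.keys (fun k => vote_counts.getD k 0) with
      | some m => if m = "Yea" ∨ m = "Nay" then m else "Not Voting"
      | none => "Not Voting"  -- unreachable: votes ≠ [] makes the dict nonempty

-- ===== PORT B =====
def dsvClassify (v : String) : String :=
  if v = "Yea" ∨ v = "Nay" then v else "Not Voting"

def dsvJoin (a b : String) : String :=
  if a = "Not Voting" then b
  else if b = "Not Voting" then a
  else if a = b then a
  else "Split"

def dsvLoop : String → List String → String
  | r, [] => r
  | r, v :: rest =>
      let r' := dsvJoin r (dsvClassify v)
      if r' = "Split" then r' else dsvLoop r' rest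

def determine_state_vote_alt (votes : List String) : String :=
  dsvLoop "Not Voting" votes

-- ===== PRECONDITION & SPEC =====
def Spec_determine_state_vote (votes : List String) (out : String) : Prop := out = determine_state_vote_alt votes
instance (votes : List String) (out : String) : Decidable (Spec_determine_state_vote votes out) := by unfold Spec_determine_state_vote; infer_instance

-- ===== CLAIM (what is proved, stated in full; the proofs are below) =====
def Claim_equal_determine_state_vote : Prop := ∀ (votes : List String), Dom_determine_state_vote votes → Spec_determine_state_vote votes (determine_state_vote votes)

-- ===== LEMMAS AND PROOFS =====

-- Characterisation of B's loop in terms of membership of "Yea"/"Nay" in the remaining votes.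
theorem dsvLoop_spec (votes : List String) (r : String)
    (hr : r = "Not Voting" ∨ r = "Yea" ∨ r = "Nay") :
    dsvLoop r votes =
      if (r = "Yea" ∨ "Yea" ∈ votes) ∧ (r = "Nay" ∨ "Nay" ∈ votes) then "Split"
      else if r = "Yea" ∨ "Yea" ∈ votes then "Yea"
      else if r = "Nay" ∨ "Nay" ∈ votes then "Nay"
      else "Not Voting" := by
  induction votes generalizing r with
  | nil =>
    rcases hr with h | h | h <;> subst h <;> simp [dsvLoop]
  | cons v rest ih =>
    by_cases hvy : v = "Yea" <;> by_cases hvn : v = "Nay" <;>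
      rcases hr with h | h | h <;> subst h <;>
      simp_all [dsvLoop, dsvClassify, dsvJoin, eq_comm]

theorem determine_state_vote_spec' (votes : List String) :
    determine_state_vote votes = determine_state_vote_alt votes := by
  unfold determine_state_vote determine_state_vote_alt
  rw [dsvLoop_spec votes "Not Voting" (Or.inl rfl)]
  by_cases hnil : votes = []
  · simp [hnil]
  · simp only [hnil, if_false]
    rw [← PySem.Dict.counter_eq_foldl]
    have hy : (PySem.Dict.counter votes).getD "Yea" 0 = votes.count "Yea" :=
      PySem.Dict.getD_counter votes "Yea"
    have hn : (PySem.Dict.counter votes).getD "Nay" 0 = votes.count "Nay" :=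
      PySem.Dict.getD_counter votes "Nay"
    by_cases hY : 0 < votes.count "Yea" <;> by_cases hN : 0 < votes.count "Nay"
    · simp [hy, hn, hY, hN, List.count_pos_iff.mp hY, List.count_pos_iff.mp hN]
    · have hn0 : votes.count "Nay" = 0 := by omega
      have hNne : "Nay" ∉ votes := List.count_eq_zero.mp hn0
      simp [hy, hn, hn0, hY, List.count_pos_iff.mp hY, hNne]
    · have hy0 : votes.count "Yea" = 0 := by omega
      have hYne : "Yea" ∉ votes := List.count_eq_zero.mp hy0
      simp [hy, hn, hy0, hN, List.count_pos_iff.mp hN, hYne]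
    · have hy0 : votes.count "Yea" = 0 := by omega
      have hn0 : votes.count "Nay" = 0 := by omega
      have hYne : "Yea" ∉ votes := List.count_eq_zero.mp hy0
      have hNne : "Nay" ∉ votes := List.count_eq_zero.mp hn0
      cases hmax : PySem.List.max? (PySem.Dict.counter votes).keys
          (fun k => (PySem.Dict.counter votes).getD k 0) with
      | none => simp [hy, hn, hy0, hn0, hYne, hNne]
      | some m =>
        have hm : m ∈ (PySem.Dict.counter votes).keys := PySem.List.max?_mem hmax
        rw [PySem.Dict.keys_counter, PySem.Set.mem_ofList] at hm
        have hm1 : m ≠ "Yea" := fun h => hYne (h ▸ hm)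
        have hm2 : m ≠ "Nay" := fun h => hNne (h ▸ hm)
        simp [hy, hn, hy0, hn0, hYne, hNne, hm1, hm2]

-- ===== VERDICT (by name: the statement is the Claim_ definition above) =====
theorem determine_state_vote_spec : Claim_equal_determine_state_vote := by
  intro votes _
  unfold Spec_determine_state_vote
  exact determine_state_vote_spec' votes
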